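-- pv_equiv track=rewrite | github.com/KaioVinicios/CodeWars | Python/21_12_23.py | quicksum
-- ===== SOURCE A (Python) =====
-- def quicksum(packet):
--     pass
--     data = ' ABCDEFGHIJKLMNOPQRSTUVWXYZ'
--     value = []
--     position = []
--     result = 0
--     for n in range(0, len(packet)):
--         if packet[n] == ' ':
--             position.append(n + 1)
--             value.append(0)
--         elif packet[n] in data:
--             value.append(data.find(packet[n]))
--             position.append(n + 1)
--             result += (position[n] * value[n])
--         else:
--             return 0
--     return result
-- ===== SOURCE B (Python) =====
-- def quicksum(packet):
--     # Right-to-left single pass using the suffix-sum identity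
--     # sum_i (i+1)*v_i = sum over k of (v_k + v_{k+1} + ... + v_{n-1}):
--     # s holds the running value sum of the suffix seen so far, t adds s each step.
--     data = ' ABCDEFGHIJKLMNOPQRSTUVWXYZ'
--     s = 0
--     t = 0
--     for ch in reversed(packet):
--         v = data.find(ch)
--         if v < 0:
--             return 0
--         s += v
--         t += s
--     return t
-- ===== Notes on version B (the rewrite author's own statement) =====
-- stated objective: alternative
-- what changed: Replaced A's left-to-right indexed loop with value/position lists and result += position[n]*value[n] by a right-to-left single pass with a pair accumulator using the suffix-sum identity sum_i (i+1)*v_i = sum of all suffix value sums: s accumulates the running value sum and t adds s each step, so no indices or lists exist at all.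
import Mathlib
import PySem

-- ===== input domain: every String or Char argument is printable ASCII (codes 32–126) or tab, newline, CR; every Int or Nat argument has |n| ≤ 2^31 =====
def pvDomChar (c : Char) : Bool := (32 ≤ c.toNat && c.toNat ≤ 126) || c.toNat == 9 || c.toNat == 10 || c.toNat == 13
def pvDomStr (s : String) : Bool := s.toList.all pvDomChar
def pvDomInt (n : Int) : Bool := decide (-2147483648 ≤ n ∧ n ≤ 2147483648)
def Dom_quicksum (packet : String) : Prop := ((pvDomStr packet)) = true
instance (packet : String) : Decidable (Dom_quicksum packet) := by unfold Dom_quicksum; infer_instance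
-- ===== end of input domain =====

-- B replaces A's indexed left-to-right loop (value/position lists, result += position[n]*value[n])
-- by a right-to-left pass with a pair accumulator based on the suffix-sum identity; objective: alternative.

-- ===== PORT A =====
-- the loop of A: n runs over range(0, len(packet)); value/position grow by append;
-- the list reads position[n]/value[n] are always in range (both lists have length n+1 there),
-- so pyGetD with default 0 is exact.
def quicksumGo (pk data : List Char) (n : Nat) (value position : List Int) (result : Int) : Int :=
  if h : n < pk.length then
    if pk[n] = ' ' then
      quicksumGo pk data (n + 1) (value ++ [0]) (position ++ [(n : Int) + 1]) result
    else if PySem.Chars.isIn [pk[n]] data then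
      let value' := value ++ [PySem.Chars.find data [pk[n]]]
      let position' := position ++ [(n : Int) + 1]
      quicksumGo pk data (n + 1) value' position'
        (result + PySem.List.pyGetD position' (n : Int) 0 * PySem.List.pyGetD value' (n : Int) 0)
    else 0
  else result
termination_by pk.length - n

def quicksum (packet : String) : Int :=
  let data := " ABCDEFGHIJKLMNOPQRSTUVWXYZ".toList
  quicksumGo packet.toList data 0 [] [] 0

-- ===== PORT B =====
-- the loop of Source B: for ch in reversed(packet), state (s, t); data.find(ch) < 0 returns 0
def quicksumAltGo (data : List Char) : List Char → Int → Int → Int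
  | [], _, t => t
  | c :: cs, s, t =>
    let v := PySem.Chars.find data [c]
    if v < 0 then 0 else quicksumAltGo data cs (s + v) (t + (s + v))

def quicksum_alt (packet : String) : Int :=
  let data := " ABCDEFGHIJKLMNOPQRSTUVWXYZ".toList
  quicksumAltGo data packet.toList.reverse 0 0

-- ===== PRECONDITION & SPEC =====
def Spec_quicksum (packet : String) (out : Int) : Prop := out = quicksum_alt packet
instance (packet : String) (out : Int) : Decidable (Spec_quicksum packet out) := by unfold Spec_quicksum; infer_instance

-- ===== CLAIM (what is proved, stated in full; the proofs are below) =====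
def Claim_equal_quicksum : Prop := ∀ (packet : String), Dom_quicksum packet → Spec_quicksum packet (quicksum packet)

-- ===== LEMMAS AND PROOFS =====

def pvData : List Char := " ABCDEFGHIJKLMNOPQRSTUVWXYZ".toList

-- the value A stores (and B's find result): index in the alphabet (-1 if absent)
def pvVal (c : Char) : Int := PySem.Chars.find pvData [c]

-- positional weighted sum of values, positions starting at p
def pvWsum : List Char → Int → Int
  | [], _ => 0
  | c :: cs, p => p * pvVal c + pvWsum cs (p + 1)

-- plain value sum
def pvVsum : List Char → Int
  | [] => 0
  | c :: cs => pvVal c + pvVsum cs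

-- sum of suffix value sums = weighted sum counted from the right
def pvWeight : List Char → Int
  | [] => 0
  | c :: cs => ((cs.length : Int) + 1) * pvVal c + pvWeight cs

-- single-char `in` is membership
theorem pv_isIn_singleton (c : Char) (l : List Char) :
    PySem.Chars.isIn [c] l = l.contains c := by
  by_cases h : c ∈ l
  · have hi : [c] <:+: l := by
      rcases List.mem_iff_append.mp h with ⟨s, t, rfl⟩
      exact ⟨s, t, by simp⟩
    rw [(PySem.Chars.isIn_iff_infix [c] l).mpr hi]
    simp [h]
  · have hni : ¬ ([c] <:+: l) := fun hi => h (hi.subset (by simp))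
    have h2 : PySem.Chars.isIn [c] l = false := by
      cases hb : PySem.Chars.isIn [c] l
      · rfl
      · exact absurd ((PySem.Chars.isIn_iff_infix [c] l).mp hb) hni
    rw [h2]
    simp [h]

theorem pv_val_nonneg_iff (c : Char) : 0 ≤ pvVal c ↔ pvData.contains c = true := by
  unfold pvVal
  rw [PySem.Chars.find_nonneg_iff]
  constructor
  · intro hi
    simpa using hi.subset (by simp)
  · intro hc
    rcases List.mem_iff_append.mp (by simpa using hc) with ⟨s, t, heq⟩
    exact ⟨s, t, by rw [heq]; simp⟩

theorem pv_getD_append (xs : List Int) (v : Int) (i : Nat) (h : i = xs.length) :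
    (xs ++ [v]).getD i 0 = v := by
  subst h
  simp [List.getD]

-- loop invariant / characterisation of A's loop
theorem quicksumGo_spec (pk : List Char) : ∀ (k n : Nat), k = pk.length - n →
    ∀ (value position : List Int) (result : Int),
    value.length = n → position.length = n → n ≤ pk.length →
    quicksumGo pk pvData n value position result =
      (if (pk.drop n).all (fun c => pvData.contains c)
       then result + pvWsum (pk.drop n) ((n : Int) + 1)
       else 0) := by
  intro k
  induction k with
  | zero =>
    intro n hk value position result hv hp hn
    have hn' : n = pk.length := by omega
    rw [quicksumGo]
    simp [hn', pvWsum]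
  | succ k ih =>
    intro n hk value position result hv hp hn
    have hlt : n < pk.length := by omega
    have hdrop : pk.drop n = pk[n] :: pk.drop (n + 1) := List.drop_eq_getElem_cons hlt
    rw [quicksumGo]
    simp only [hlt, dif_pos]
    by_cases hsp : pk[n] = ' '
    · rw [if_pos hsp]
      rw [ih (n + 1) (by omega) _ _ result (by simp [hv]) (by simp [hp]) (by omega)]
      rw [hdrop]
      have hspmem : pvData.contains pk[n] = true := by rw [hsp]; decide
      simp only [List.all_cons, hspmem, Bool.true_and, pvWsum]
      have : pvVal pk[n] = 0 := by rw [hsp]; decide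
      rw [this]
      push_cast
      ring_nf
    · rw [if_neg hsp]
      by_cases hin : pvData.contains pk[n] = true
      · rw [if_pos (by rw [pv_isIn_singleton]; exact hin)]
        have hposr : PySem.List.pyGetD (position ++ [(n : Int) + 1]) (n : Int) 0 = (n : Int) + 1 := by
          rw [PySem.List.pyGetD_natCast]
          exact pv_getD_append position _ n hp.symm
        have hvalr : PySem.List.pyGetD (value ++ [PySem.Chars.find pvData [pk[n]]]) (n : Int) 0
            = pvVal pk[n] := by
          rw [PySem.List.pyGetD_natCast]
          exact pv_getD_append value _ n hv.symm
        rw [ih (n + 1) (by omega) _ _ _ (by simp [hv]) (by simp [hp]) (by omega)]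
        rw [hdrop, hposr, hvalr]
        simp only [List.all_cons, hin, Bool.true_and, pvWsum]
        by_cases hall : (pk.drop (n + 1)).all (fun c => pvData.contains c) = true
        · rw [if_pos hall, if_pos hall]
          push_cast
          ring_nf
        · rw [if_neg hall, if_neg hall]
      · rw [if_neg (by rw [pv_isIn_singleton]; simpa using hin)]
        rw [hdrop]
        simp only [List.all_cons, Bool.and_eq_true]
        rw [if_neg (by intro h; exact hin h.1)]

-- characterisation of B's loop
theorem quicksumAltGo_spec : ∀ (rs : List Char) (s t : Int),
    quicksumAltGo pvData rs s t =
      (if rs.all (fun c => pvData.contains c)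
       then t + (rs.length : Int) * s + pvWeight rs
       else 0) := by
  intro rs
  induction rs with
  | nil => intro s t; simp [quicksumAltGo, pvWeight]
  | cons c cs ih =>
    intro s t
    simp only [quicksumAltGo]
    by_cases hc : pvData.contains c = true
    · have hge : ¬ PySem.Chars.find pvData [c] < 0 := by
        have := (pv_val_nonneg_iff c).mpr hc
        unfold pvVal at this; omega
      rw [if_neg hge, ih]
      simp only [List.all_cons, hc, Bool.true_and, pvWeight]
      by_cases hall : cs.all (fun c => pvData.contains c) = true
      · rw [if_pos hall, if_pos hall]
        show t + (s + pvVal c) + (cs.length : Int) * (s + pvVal c) + pvWeight cs = _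
        simp only [List.length_cons]
        push_cast
        ring
      · rw [if_neg hall, if_neg hall]
    · have hlt : PySem.Chars.find pvData [c] < 0 := by
        have h0 : ¬ (0 ≤ pvVal c) := fun h => hc ((pv_val_nonneg_iff c).mp h)
        unfold pvVal at h0; omega
      rw [if_pos hlt]
      simp only [List.all_cons, Bool.and_eq_true]
      rw [if_neg (by intro h; exact hc h.1)]

theorem pv_wsum_shift (xs : List Char) : ∀ p : Int, pvWsum xs (p + 1) = pvWsum xs p + pvVsum xs := by
  induction xs with
  | nil => intro p; simp [pvWsum, pvVsum]
  | cons c cs ih =>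
    intro p
    simp only [pvWsum, pvVsum]
    rw [ih (p + 1)]
    ring

theorem pv_vsum_append (a b : List Char) : pvVsum (a ++ b) = pvVsum a + pvVsum b := by
  induction a with
  | nil => simp [pvVsum]
  | cons c cs ih => simp only [List.cons_append, pvVsum, ih]; ring

theorem pv_weight_append (ys : List Char) (x : Char) :
    pvWeight (ys ++ [x]) = pvWeight ys + pvVsum ys + pvVal x := by
  induction ys with
  | nil => simp [pvWeight, pvVsum]
  | cons y ys ih =>
    simp only [List.cons_append, pvWeight, ih, List.length_append, List.length_cons,
      List.length_nil, pvVsum]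
    push_cast
    ring

theorem pv_vsum_reverse (l : List Char) : pvVsum l.reverse = pvVsum l := by
  induction l with
  | nil => rfl
  | cons y ys ihy =>
    rw [List.reverse_cons, pv_vsum_append, ihy]
    simp [pvVsum]; ring

theorem pv_weight_reverse (l : List Char) : pvWeight l.reverse = pvWsum l 1 := by
  induction l with
  | nil => simp [pvWeight, pvWsum]
  | cons x xs ih =>
    rw [List.reverse_cons, pv_weight_append, ih, pv_vsum_reverse]
    show _ = (1 : Int) * pvVal x + pvWsum xs (1 + 1)
    rw [pv_wsum_shift xs 1]
    ring

-- ===== VERDICT (by name: the statement is the Claim_ definition above) =====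
theorem quicksum_spec : Claim_equal_quicksum := by
  intro packet _
  unfold Spec_quicksum quicksum quicksum_alt
  rw [show " ABCDEFGHIJKLMNOPQRSTUVWXYZ".toList = pvData from rfl]
  rw [quicksumGo_spec packet.toList (packet.toList.length - 0) 0 rfl [] [] 0 rfl rfl (by omega)]
  rw [quicksumAltGo_spec]
  simp only [List.drop_zero, Nat.cast_zero, zero_add, List.all_reverse, mul_zero, add_zero]
  rw [pv_weight_reverse]
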